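-- pv_equiv track=rewrite | github.com/NavpreetKR/Python-Training | Lecture_17/.ipynb_checkpoints/Count_SBSQ-checkpoint.py | countSbsq
-- ===== SOURCE A (Python) =====
-- def countSbsq(processed,unprocessed,count=0):
--     if len(unprocessed) == 0:
--         if len(processed) == 0:    # since at last base case both processed as well a unprocessed'll be 0
--             return 0
--         else:
--             return 1
--
--     ch = unprocessed[0]
--
--     left  = countSbsq(processed + ch, unprocessed[1:])
--     right = countSbsq(processed, unprocessed[1:])
--     return left + right
-- ===== SOURCE B (Python) =====
-- def countSbsq(processed, unprocessed, count=0):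
--     # Each subset of unprocessed's positions yields one leaf; the leaf counts 1
--     # unless both processed and the chosen subset are empty.
--     return (1 << len(unprocessed)) - (1 if len(processed) == 0 else 0)
-- ===== Notes on version B (the rewrite author's own statement) =====
-- stated objective: faster
-- what changed: Replaced the exponential branching recursion with the closed form 2^len(unprocessed) minus 1 when processed is empty.
import Mathlib
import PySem

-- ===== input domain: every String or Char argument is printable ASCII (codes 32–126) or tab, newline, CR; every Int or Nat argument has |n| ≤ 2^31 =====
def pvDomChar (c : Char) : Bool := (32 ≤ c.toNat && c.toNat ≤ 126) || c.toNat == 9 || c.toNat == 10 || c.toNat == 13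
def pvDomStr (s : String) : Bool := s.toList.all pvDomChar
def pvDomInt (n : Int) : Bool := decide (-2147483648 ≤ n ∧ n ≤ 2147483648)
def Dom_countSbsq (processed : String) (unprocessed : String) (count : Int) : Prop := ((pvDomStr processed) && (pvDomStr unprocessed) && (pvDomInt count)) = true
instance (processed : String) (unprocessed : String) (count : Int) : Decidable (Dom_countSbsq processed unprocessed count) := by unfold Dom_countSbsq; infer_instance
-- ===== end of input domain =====

-- B replaces A's 2^n branching recursion by the closed form 2^|unprocessed| - [processed empty]; return values proved equal.

-- ===== PORT A =====
-- literal transliteration of A's recursion, on the strings' character lists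
def countSbsqRec (processed : List Char) (unprocessed : List Char) : Int :=
  match unprocessed with
  | [] => if processed = [] then 0 else 1
  | ch :: rest => countSbsqRec (processed ++ [ch]) rest + countSbsqRec processed rest

def countSbsq (processed : String) (unprocessed : String) (count : Int) : Int :=
  countSbsqRec processed.toList unprocessed.toList

-- ===== PORT B =====
def countSbsq_alt (processed : String) (unprocessed : String) (count : Int) : Int :=
  (2 ^ unprocessed.toList.length : Int) - (if processed.toList.length = 0 then 1 else 0)

-- ===== PRECONDITION & SPEC =====
def Spec_countSbsq (processed : String) (unprocessed : String) (count : Int) (out : Int) : Prop := out = countSbsq_alt processed unprocessed count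
instance (processed : String) (unprocessed : String) (count : Int) (out : Int) : Decidable (Spec_countSbsq processed unprocessed count out) := by unfold Spec_countSbsq; infer_instance

-- ===== CLAIM =====
def Claim_equal_countSbsq : Prop := ∀ (processed : String) (unprocessed : String) (count : Int), Dom_countSbsq processed unprocessed count → Spec_countSbsq processed unprocessed count (countSbsq processed unprocessed count)

-- ===== LEMMAS AND PROOFS =====
theorem countSbsqRec_closed (u p : List Char) :
    countSbsqRec p u = (2 ^ u.length : Int) - (if p = [] then 1 else 0) := by
  induction u generalizing p with
  | nil => simp only [countSbsqRec, List.length_nil, pow_zero]; split_ifs <;> omega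
  | cons ch rest ih =>
    simp only [countSbsqRec, ih (p ++ [ch]), ih p, List.length_cons,
      List.append_eq_nil_iff, List.cons_ne_nil, and_false, if_false, pow_succ]
    split_ifs <;> ring

-- ===== VERDICT =====
theorem countSbsq_spec : Claim_equal_countSbsq := by
  intro p u c _
  unfold Spec_countSbsq countSbsq countSbsq_alt
  rw [countSbsqRec_closed]
  simp only [List.length_eq_zero_iff]
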